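-- pv_equiv track=rewrite | github.com/MISP/PyMISP | examples/situational-awareness/tools.py | buildNewColumn
-- ===== SOURCE A (Python) =====
-- def buildNewColumn(index2, column):
--     it = -1
--     newcolumn = []
--     for index in index2:
--         if index == 0:
--             it += 1
--         newcolumn.append(column[it])
--     return newcolumn
-- ===== SOURCE B (Python) =====
-- def buildNewColumn(index2, column):
--     # Block-splitting recursion: find the next zero marker, emit the whole
--     # zero-free block before it as a repeated segment (list multiplication),
--     # emit the zero's own value, and recurse past it with the next column slot.
--     def go(rest, j):
--         if not rest:
--             return []
--         if 0 not in rest: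
--             return [column[j - 1]] * len(rest)
--         i = rest.index(0)
--         return [column[j - 1]] * i + [column[j]] + go(rest[i + 1:], j + 1)
--     return go(index2, 0)
-- ===== Notes on version B (the rewrite author's own statement) =====
-- stated objective: alternative
-- what changed: Replaces A's element-wise loop with a running counter by a block-splitting recursion: it locates each zero marker with list.index, emits the whole zero-free block before it at once via list multiplication, then recurses on the slice past the zero with the next column slot.
import Mathlib
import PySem

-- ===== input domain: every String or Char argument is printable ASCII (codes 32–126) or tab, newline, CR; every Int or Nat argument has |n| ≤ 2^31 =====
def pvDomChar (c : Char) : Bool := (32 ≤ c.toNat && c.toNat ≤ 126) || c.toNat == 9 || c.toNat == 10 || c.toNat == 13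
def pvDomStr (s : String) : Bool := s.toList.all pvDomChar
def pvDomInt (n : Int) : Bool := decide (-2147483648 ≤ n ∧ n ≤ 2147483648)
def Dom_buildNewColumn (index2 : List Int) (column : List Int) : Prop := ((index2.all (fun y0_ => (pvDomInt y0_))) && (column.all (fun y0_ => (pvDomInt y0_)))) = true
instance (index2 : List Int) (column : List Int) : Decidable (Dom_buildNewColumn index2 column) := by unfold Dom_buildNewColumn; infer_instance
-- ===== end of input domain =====

-- B replaces A's element-wise counter loop by a block-splitting recursion over the
-- positions of zero markers (find-next-zero, emit the block at once, recurse); same cost.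

-- ===== PORT A =====
-- A's loop: state (it, newcolumn); column[it] with Python's negative indexing via pyGet?
-- (the .getD 0 default is only reached outside Pre_, where Python A raises IndexError).
def buildNewColumn (index2 : List Int) (column : List Int) : List Int :=
  (index2.foldl
    (fun (s : Int × List Int) index =>
      let it := if index == 0 then s.1 + 1 else s.1
      (it, s.2 ++ [(PySem.List.pyGet? column it).getD 0]))
    (-1, [])).2

-- ===== PORT B =====
-- go(rest, j): empty → []; no zero in rest → [column[j-1]] * len(rest);
-- else i = rest.index(0), emit [column[j-1]] * i + [column[j]], recurse on rest[i+1:] with j+1.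
-- rest[i+1:] is ported as drop (i+1) — exact here since index? returns a valid index i ≥ 0.
def buildNewColumnGo (column : List Int) (rest : List Int) (j : Int) : List Int :=
  if hr : rest = [] then []
  else if rest.contains 0 = false then
    List.replicate rest.length ((PySem.List.pyGet? column (j - 1)).getD 0)
  else
    match PySem.List.index? rest 0 with
    | none => []  -- unreachable: 0 ∈ rest
    | some i =>
      List.replicate i ((PySem.List.pyGet? column (j - 1)).getD 0)
        ++ (PySem.List.pyGet? column j).getD 0
        :: buildNewColumnGo column (rest.drop (i + 1)) (j + 1)
termination_by rest.length
decreasing_by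
  have : rest.length ≠ 0 := fun h => hr (List.eq_nil_of_length_eq_zero h)
  simp [List.length_drop]; omega

def buildNewColumn_alt (index2 : List Int) (column : List Int) : List Int :=
  buildNewColumnGo column index2 0

-- ===== PRECONDITION & SPEC =====
-- Pre_ excludes exactly the inputs where Python A raises IndexError: a nonempty index2
-- with an empty column, or more zero markers than column has entries.
def Pre_buildNewColumn (index2 : List Int) (column : List Int) : Prop :=
  index2 = [] ∨ (column ≠ [] ∧ index2.count 0 ≤ column.length)
instance (index2 : List Int) (column : List Int) : Decidable (Pre_buildNewColumn index2 column) := by unfold Pre_buildNewColumn; infer_instance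
def pvWitness_buildNewColumn : List Int × List Int := ([0, 5, 0], [10, 20])

def Spec_buildNewColumn (index2 : List Int) (column : List Int) (out : List Int) : Prop := out = buildNewColumn_alt index2 column
instance (index2 : List Int) (column : List Int) (out : List Int) : Decidable (Spec_buildNewColumn index2 column out) := by unfold Spec_buildNewColumn; infer_instance

-- ===== CLAIM (what is proved, stated in full; the proofs are below) =====
def Claim_equal_buildNewColumn : Prop := ∀ (index2 : List Int) (column : List Int), Dom_buildNewColumn index2 column → Pre_buildNewColumn index2 column → Spec_buildNewColumn index2 column (buildNewColumn index2 column)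

-- ===== LEMMAS AND PROOFS =====

-- Canonical element-wise recursion both ports are reduced to.
def pvCanon (column : List Int) (it : Int) : List Int → List Int
  | [] => []
  | x :: xs =>
    let it' := if x == 0 then it + 1 else it
    (PySem.List.pyGet? column it').getD 0 :: pvCanon column it' xs

-- A's foldl with accumulator equals acc ++ canonical recursion.
theorem pvCanon_foldl (column : List Int) (l : List Int) (t : Int) (acc : List Int) :
    (l.foldl
      (fun (s : Int × List Int) index =>
        let it := if index == 0 then s.1 + 1 else s.1
        (it, s.2 ++ [(PySem.List.pyGet? column it).getD 0]))
      (t, acc)).2 = acc ++ pvCanon column t l := by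
  induction l generalizing t acc with
  | nil => simp [pvCanon]
  | cons x xs ih =>
    simp only [List.foldl_cons]
    by_cases hx : x = 0
    · subst hx
      have := ih (t + 1) (acc ++ [(PySem.List.pyGet? column (t + 1)).getD 0])
      simpa [pvCanon] using this
    · have hb : (x == (0 : Int)) = false := by simp [hx]
      have := ih t (acc ++ [(PySem.List.pyGet? column t).getD 0])
      simpa [pvCanon, hb] using this

-- Canonical recursion on a zero-free list: the counter never moves.
theorem pvCanon_no_zero (column : List Int) (l : List Int) (it : Int)
    (h : (0 : Int) ∉ l) :
    pvCanon column it l = List.replicate l.length ((PySem.List.pyGet? column it).getD 0) := by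
  induction l with
  | nil => rfl
  | cons x xs ih =>
    simp only [List.mem_cons, not_or] at h
    simp [pvCanon, Ne.symm h.1, ih h.2, List.replicate_succ]

-- Canonical recursion across a zero-free prefix followed by a zero.
theorem pvCanon_split (column : List Int) (p r : List Int) (it : Int)
    (hp : (0 : Int) ∉ p) :
    pvCanon column it (p ++ 0 :: r)
      = List.replicate p.length ((PySem.List.pyGet? column it).getD 0)
        ++ (PySem.List.pyGet? column (it + 1)).getD 0 :: pvCanon column (it + 1) r := by
  induction p generalizing it with
  | nil => simp [pvCanon]
  | cons x xs ih =>
    simp only [List.mem_cons, not_or] at hp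
    simp [pvCanon, Ne.symm hp.1, ih _ hp.2, List.replicate_succ]

-- B's block recursion equals the canonical recursion (strong induction on length).
theorem pvGo_eq_canon (column : List Int) :
    ∀ (n : ℕ) (rest : List Int), rest.length ≤ n → ∀ (j : Int),
      buildNewColumnGo column rest j = pvCanon column (j - 1) rest := by
  intro n
  induction n with
  | zero =>
    intro rest hn j
    have : rest = [] := List.eq_nil_of_length_eq_zero (Nat.le_zero.mp hn)
    subst this; rw [buildNewColumnGo]; simp [pvCanon]
  | succ n ih =>
    intro rest hn j
    by_cases hr : rest = []
    · subst hr; rw [buildNewColumnGo]; simp [pvCanon]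
    · by_cases hc : rest.contains 0 = false
      · have h0 : (0 : Int) ∉ rest := by simpa using hc
        rw [buildNewColumnGo, dif_neg hr, if_pos hc, pvCanon_no_zero column rest (j - 1) h0]
      · have hmem : (0 : Int) ∈ rest := by
          by_contra h; exact hc (by simpa using h)
        obtain ⟨i, hi⟩ := Option.isSome_iff_exists.mp
          ((PySem.List.index?_isSome_iff rest 0).mpr hmem)
        obtain ⟨pre, suf, hsplit, hlen, hpre⟩ := (PySem.List.index?_eq_some_iff rest 0 i).mp hi
        rw [buildNewColumnGo, dif_neg hr, if_neg hc, hi]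
        show List.replicate i ((PySem.List.pyGet? column (j - 1)).getD 0)
              ++ (PySem.List.pyGet? column j).getD 0
              :: buildNewColumnGo column (rest.drop (i + 1)) (j + 1)
            = pvCanon column (j - 1) rest
        have hdrop : rest.drop (i + 1) = suf := by
          subst hsplit; rw [← hlen]; simp [List.drop_append]
        have hlt : suf.length ≤ n := by
          have : rest.length = pre.length + 1 + suf.length := by
            subst hsplit; simp; omega
          omega
        rw [hdrop, ih suf hlt (j + 1)]
        have hcan : pvCanon column (j - 1) rest
            = List.replicate pre.length ((PySem.List.pyGet? column (j - 1)).getD 0)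
              ++ (PySem.List.pyGet? column (j - 1 + 1)).getD 0
              :: pvCanon column (j - 1 + 1) suf := by
          rw [hsplit]; exact pvCanon_split column pre suf (j - 1) hpre
        rw [hcan, hlen]
        norm_num

-- ===== VERDICT (by name: the statement is the Claim_ definition above) =====
theorem buildNewColumn_spec : Claim_equal_buildNewColumn := by
  intro index2 column _ _
  unfold Spec_buildNewColumn buildNewColumn buildNewColumn_alt
  rw [pvCanon_foldl column index2 (-1) [], pvGo_eq_canon column index2.length index2 le_rfl 0]
  norm_num
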